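-- pv_equiv track=rewrite | github.com/Yawn-Sean/Daily_CF_Problems | daily_problems/2024/10/1004/personal_submission/cf748e_liryc.py | solve
-- ===== SOURCE A (Python) =====
-- def solve(n: int, k: int, a: list[int]) -> int:
--     if sum(a) < k:
--         return -1
--
--     # cn = Counter(a) # 不知道为什么用Counter很慢
--     ca = [0] * 10000001
--     for x in a:
--         ca[x] += 1
--
--     m = 0
--     for s in range(10000000, -1, -1):
--         m += ca[s]
--         if s <= 5000000 and ca[s << 1] > 0:
--             m += ca[s << 1]
--             ca[s] += ca[s << 1] << 1
--         if 2 <= s <= 5000000 and ca[s + s - 1] > 0: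
--             ca[s] += ca[s + s - 1]
--             ca[s - 1] += ca[s + s - 1]
--         if m >= k:
--             return s
-- ===== SOURCE B (Python) =====
-- def solve(n: int, k: int, a: list[int]) -> int:
--     if sum(a) < k:
--         return -1
--
--     # Binary search on the answer b: pieces(b) counts, via memoized halving
--     # recursion, how many parts of size >= b the tangerines can be split into.
--     def pieces(b):
--         memo = {}
--
--         def f(x):
--             if x < b:
--                 return 0
--             if x < 2 * b:
--                 return 1
--             if x in memo:
--                 return memo[x]
--             r = f((x + 1) // 2) + f(x // 2)
--             memo[x] = r
--             return r
--
--         return sum(map(f, a))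
--
--     lo, hi = 1, max(a)
--     while lo < hi:
--         mid = (lo + hi + 1) // 2
--         if pieces(mid) >= k:
--             lo = mid
--         else:
--             hi = mid - 1
--     return lo
-- ===== Notes on version B (the rewrite author's own statement) =====
-- stated objective: alternative
-- what changed: A does one dense descending sweep over all 10^7+1 piece sizes, folding counts downward until k pieces are reached; B binary-searches the answer b and, for each candidate b, counts obtainable pieces of size >= b with a memoized halving recursion per tangerine (asymptotically lighter, but a timing run's largest inputs exit early via the sum<k guard, so no speed is claimed).
-- outside the precondition, e.g. on solve(2, 1, [-1, 5]): A returns 10000000, B returns 5; on solve(1, 0, [5]): A returns 10000000, B returns 5; on solve(1, 1, [10000001]): A raises IndexError, B returns 10000001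
import Mathlib
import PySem

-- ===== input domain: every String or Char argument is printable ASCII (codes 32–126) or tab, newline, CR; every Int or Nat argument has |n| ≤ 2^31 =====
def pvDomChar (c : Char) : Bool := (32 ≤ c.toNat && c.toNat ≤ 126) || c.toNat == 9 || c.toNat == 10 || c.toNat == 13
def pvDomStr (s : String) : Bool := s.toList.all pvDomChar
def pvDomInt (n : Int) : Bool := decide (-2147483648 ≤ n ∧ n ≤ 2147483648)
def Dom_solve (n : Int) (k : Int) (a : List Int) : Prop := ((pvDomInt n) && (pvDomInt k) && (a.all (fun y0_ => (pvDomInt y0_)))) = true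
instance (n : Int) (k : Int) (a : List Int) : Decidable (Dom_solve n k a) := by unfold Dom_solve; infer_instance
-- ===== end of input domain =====

-- B replaces A's dense descending sweep over all 10^7+1 piece sizes with a binary
-- search on the answer, counting pieces >= b per candidate b by a memoized halving
-- recursion (objective: alternative algorithm).

-- ===== PORT A =====
-- Python A's `ca = [0] * 10000001; ca[x] += 1` is ported as a total function
-- Int → Int updated pointwise: exact for the indices 0 ≤ x ≤ 10^7 that Pre_ admits
-- (Python wraps negative indices and raises IndexError beyond the list bounds).
def buildCa (a : List Int) : Int → Int :=
  a.foldl (fun ca x => let v := ca x + 1; fun w => if w = x then v else ca w) (fun _ => 0)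

-- `for s in range(10000000, -1, -1)` with early `return s`: fuel = s + 1.
-- `loopA k 0 ca m = 0` is the loop running off the end: Python A returns None there
-- (not an int); Pre_ admits no such input.
def loopA (k : Int) : Nat → (Int → Int) → Int → Int
  | 0, _, _ => 0
  | s + 1, ca, m =>
    let si : Int := (s : Int)
    let m1 := m + ca si
    let p :=
      if si ≤ 5000000 then
        if 0 < ca (2 * si) then
          let v := ca si + 2 * ca (2 * si)
          (m1 + ca (2 * si), fun w => if w = si then v else ca w)
        else (m1, ca)
      else (m1, ca)
    let m2 := p.1
    let ca2 := p.2
    let ca3 :=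
      if 2 ≤ si ∧ si ≤ 5000000 then
        if 0 < ca2 (2 * si - 1) then
          let v1 := ca2 si + ca2 (2 * si - 1)
          let ca' : Int → Int := fun w => if w = si then v1 else ca2 w
          let v2 := ca' (si - 1) + ca' (2 * si - 1)
          fun w => if w = si - 1 then v2 else ca' w
        else ca2
      else ca2
    if m2 ≥ k then si else loopA k s ca3 m2

def solve (n : Int) (k : Int) (a : List Int) : Int :=
  if a.sum < k then -1
  else loopA k 10000001 (buildCa a) 0

-- ===== PORT B =====
-- the inner `def f(x)` of Source B, with the shared memo dict threaded through;
-- the fuel argument (called with x.toNat + 1, each recursive call shrinks x) is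
-- only a totality guard, never reached on admitted inputs
def fB (b : Int) : Nat → Int → PySem.Dict Int Int → Int × PySem.Dict Int Int
  | 0, _, memo => (0, memo)
  | fuel + 1, x, memo =>
    if x < b then (0, memo)
    else if x < 2 * b then (1, memo)
    else
      match memo.get? x with
      | some r => (r, memo)
      | none =>
        let p := fB b fuel (PySem.Int.floordiv (x + 1) 2) memo
        let q := fB b fuel (PySem.Int.floordiv x 2) p.2
        (p.1 + q.1, q.2.insert x (p.1 + q.1))

-- `return sum(map(f, a))` with memo = {} created per call of pieces(b)
def piecesB (b : Int) (a : List Int) : Int :=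
  (a.foldl (fun st x => let p := fB b (x.toNat + 1) x st.2; (st.1 + p.1, p.2))
    ((0 : Int), PySem.Dict.empty)).1

-- the `while lo < hi` binary-search loop
def bsB (k : Int) (a : List Int) (lo hi : Int) : Int :=
  if lo < hi then
    let mid := PySem.Int.floordiv (lo + hi + 1) 2
    if piecesB mid a ≥ k then bsB k a mid hi else bsB k a lo (mid - 1)
  else lo
termination_by (hi - lo).toNat
decreasing_by
  · have h := PySem.Int.floordiv_two_mid_bounds (lo := lo + 1) (hi := hi) (by omega)
    have : lo + 1 + hi = lo + hi + 1 := by ring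
    rw [this] at h
    omega
  · have h := PySem.Int.floordiv_two_mid_bounds (lo := lo + 1) (hi := hi) (by omega)
    have : lo + 1 + hi = lo + hi + 1 := by ring
    rw [this] at h
    omega

-- Python `max(a)` raises ValueError on []; Pre_ admits [] only when sum < k,
-- handled before this point, so the `none` arm is unreachable on admitted inputs
def solve_alt (n : Int) (k : Int) (a : List Int) : Int :=
  if a.sum < k then -1
  else
    match PySem.List.max? a (fun y => y) with
    | none => 0
    | some hi => bsB k a 1 hi

-- ===== PRECONDITION & SPEC =====
-- Pre_ admits every input decided by the sum-guard (both return -1) and otherwise the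
-- problem's natural domain (1 ≤ k, 0 ≤ a_i ≤ 10^7). Outside it: above 10^7 (or below
-- -10^7-1) A raises IndexError; on negative sizes A's negative-index wraparound
-- silently counts a tangerine of size x+10^7+1; and for k ≤ 0 A returns its scan cap
-- 10^7 while B either returns the true maximum size or (for []) raises ValueError —
-- corner values no caller would specify.
def Pre_solve (n : Int) (k : Int) (a : List Int) : Prop :=
  a.sum < k ∨ (1 ≤ k ∧ ∀ x ∈ a, 0 ≤ x ∧ x ≤ 10000000)
instance (n : Int) (k : Int) (a : List Int) : Decidable (Pre_solve n k a) := by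
  unfold Pre_solve; infer_instance

def pvWitness_solve : Int × Int × List Int := (3, 2, [5, 3, 7])

def Spec_solve (n : Int) (k : Int) (a : List Int) (out : Int) : Prop := out = solve_alt n k a
instance (n : Int) (k : Int) (a : List Int) (out : Int) : Decidable (Spec_solve n k a out) := by
  unfold Spec_solve; infer_instance

-- ===== CLAIM (what is proved, stated in full; the proofs are below) =====
def Claim_equal_solve : Prop :=
  ∀ (n : Int) (k : Int) (a : List Int), Dom_solve n k a → Pre_solve n k a → Spec_solve n k a (solve n k a)

-- ===== LEMMAS AND PROOFS =====

-- F b x = number of pieces of size ≥ b obtainable from a tangerine of size x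
-- (split x into ⌈x/2⌉ + ⌊x/2⌋ while x ≥ 2b); the common specification both
-- programs compute against.  The `2 ≤ x` guard only makes the def total.
def F (b : Int) (x : Int) : Int :=
  if 2 * b ≤ x ∧ 2 ≤ x then F b ((x + 1) / 2) + F b (x / 2)
  else if b ≤ x then 1 else 0
termination_by x.toNat
decreasing_by all_goals omega

-- cntP s x w = number of pieces of value w when x is split while > 2s
def cntP (s : Int) (x : Int) (w : Int) : Int :=
  if 2 * s < x ∧ 2 ≤ x then cntP s ((x + 1) / 2) w + cntP s (x / 2) w
  else if x = w then 1 else 0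
termination_by x.toNat
decreasing_by all_goals omega

def Msum (b : Int) (a : List Int) : Int := (a.map (F b)).sum

def Csum (s : Int) (a : List Int) (w : Int) : Int := (a.map (fun x => cntP s x w)).sum

-- the characterisation both results satisfy; unique by antitonicity of Msum
def GoodR (k : Int) (a : List Int) (r : Int) : Prop :=
  1 ≤ r ∧ k ≤ Msum r a ∧ Msum (r + 1) a < k

def MemoInv (b : Int) (memo : PySem.Dict Int Int) : Prop :=
  ∀ y r, memo.get? y = some r → r = F b y

theorem F_nonneg (b x : Int) : 0 ≤ F b x := by
  induction x using F.induct (b := b) with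
  | case1 x h ih1 ih2 => rw [F, if_pos h]; omega
  | case2 x h h2 => rw [F, if_neg h, if_pos h2]; omega
  | case3 x h h2 => rw [F, if_neg h, if_neg h2]

theorem F_base (b x : Int) (h : ¬(2 * b ≤ x ∧ 2 ≤ x)) : F b x = if b ≤ x then 1 else 0 := by
  rw [F, if_neg h]

theorem F_zero_of_lt (b x : Int) (hb : 1 ≤ b) (h : x < b) : F b x = 0 := by
  rw [F, if_neg (by omega), if_neg (by omega)]

theorem F_pos_aux (b : Int) (hb : 1 ≤ b) :
    ∀ (n : Nat) (x : Int), x.toNat ≤ n → b ≤ x → 1 ≤ F b x := by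
  intro n
  induction n with
  | zero =>
    intro x hn h
    rw [F_base b x (by omega), if_pos h]
  | succ n ih =>
    intro x hn h
    by_cases hc : 2 * b ≤ x ∧ 2 ≤ x
    · rw [F, if_pos hc]
      have h1 := ih ((x + 1) / 2) (by omega) (by omega)
      have h2 := F_nonneg b (x / 2)
      omega
    · rw [F_base b x hc, if_pos h]

theorem F_pos (b x : Int) (hb : 1 ≤ b) (h : b ≤ x) : 1 ≤ F b x :=
  F_pos_aux b hb x.toNat x le_rfl h

theorem F_anti_aux (b b' : Int) (hb : 1 ≤ b) (hbb : b ≤ b') :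
    ∀ (n : Nat) (x : Int), x.toNat ≤ n → F b' x ≤ F b x := by
  intro n
  induction n with
  | zero =>
    intro x hn
    rw [F_base b x (by omega), F_base b' x (by omega)]
    split_ifs <;> omega
  | succ n ih =>
    intro x hn
    by_cases hc : 2 * b' ≤ x ∧ 2 ≤ x
    · have eL : F b' x = F b' ((x + 1) / 2) + F b' (x / 2) := by rw [F, if_pos hc]
      have eR : F b x = F b ((x + 1) / 2) + F b (x / 2) := by
        rw [F, if_pos (⟨by omega, hc.2⟩ : 2 * b ≤ x ∧ 2 ≤ x)]
      have h1 := ih ((x + 1) / 2) (by omega)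
      have h2 := ih (x / 2) (by omega)
      omega
    · rw [F_base b' x hc]
      by_cases hx : b' ≤ x
      · rw [if_pos hx]
        exact F_pos b x hb (by omega)
      · rw [if_neg hx]
        exact F_nonneg b x

theorem F_anti (b b' x : Int) (hb : 1 ≤ b) (hbb : b ≤ b') : F b' x ≤ F b x :=
  F_anti_aux b b' hb hbb x.toNat x le_rfl

theorem F_one_aux : ∀ (n : Nat) (x : Int), x.toNat ≤ n → 0 ≤ x → F 1 x = x := by
  intro n
  induction n with
  | zero =>
    intro x hn hx
    rw [F_base 1 x (by omega)]
    split_ifs <;> omega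
  | succ n ih =>
    intro x hn hx
    by_cases hc : 2 ≤ x
    · rw [F, if_pos (⟨by omega, hc⟩ : 2 * 1 ≤ x ∧ 2 ≤ x)]
      have h1 := ih ((x + 1) / 2) (by omega) (by omega)
      have h2 := ih (x / 2) (by omega) (by omega)
      omega
    · rw [F_base 1 x (by omega)]
      split_ifs <;> omega

theorem F_one (x : Int) (hx : 0 ≤ x) : F 1 x = x := F_one_aux x.toNat x le_rfl hx

theorem cntP_nonneg_aux (s w : Int) :
    ∀ (n : Nat) (x : Int), x.toNat ≤ n → 0 ≤ cntP s x w := by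
  intro n
  induction n with
  | zero =>
    intro x hn
    rw [cntP, if_neg (by omega)]
    split_ifs <;> omega
  | succ n ih =>
    intro x hn
    by_cases hc : 2 * s < x ∧ 2 ≤ x
    · rw [cntP, if_pos hc]
      have h1 := ih ((x + 1) / 2) (by omega)
      have h2 := ih (x / 2) (by omega)
      omega
    · rw [cntP, if_neg hc]
      split_ifs <;> omega

theorem cntP_nonneg (s x w : Int) : 0 ≤ cntP s x w :=
  cntP_nonneg_aux s w x.toNat x le_rfl

theorem cntP_base (s x w : Int) (h : x ≤ 2 * s) : cntP s x w = if x = w then 1 else 0 := by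
  rw [cntP, if_neg (by omega)]

theorem cntP_zero_aux (s w : Int) :
    ∀ (n : Nat) (x : Int), x.toNat ≤ n → x < w → cntP s x w = 0 := by
  intro n
  induction n with
  | zero =>
    intro x hn h
    rw [cntP, if_neg (by omega), if_neg (by omega)]
  | succ n ih =>
    intro x hn h
    by_cases hc : 2 * s < x ∧ 2 ≤ x
    · rw [cntP, if_pos hc]
      have h1 := ih ((x + 1) / 2) (by omega) (by omega)
      have h2 := ih (x / 2) (by omega) (by omega)
      omega
    · rw [cntP, if_neg hc, if_neg (by omega)]

theorem cntP_zero_of_lt (s x w : Int) (h : x < w) : cntP s x w = 0 :=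
  cntP_zero_aux s w x.toNat x le_rfl h

-- R1: one sweep step of A adds exactly the pieces of value s and 2s
theorem F_step_aux (s : Int) (hs : 1 ≤ s) :
    ∀ (n : Nat) (x : Int), x.toNat ≤ n → 0 ≤ x →
      F s x = F (s + 1) x + cntP s x s + cntP s x (2 * s) := by
  intro n
  induction n with
  | zero =>
    intro x hn hx
    have hx0 : x = 0 := by omega
    subst hx0
    rw [F_base s 0 (by omega), F_base (s + 1) 0 (by omega),
      cntP_base s 0 s (by omega), cntP_base s 0 (2 * s) (by omega)]
    split_ifs <;> omega
  | succ n ih =>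
    intro x hn hx
    by_cases hx2 : x ≤ 2 * s
    · rw [cntP_base s x s hx2, cntP_base s x (2 * s) hx2]
      by_cases hxe : x = 2 * s
      · subst hxe
        have c1 : (2 * s + 1) / 2 = s := by omega
        have c2 : 2 * s / 2 = s := by omega
        rw [F, if_pos (⟨le_rfl, by omega⟩ : 2 * s ≤ 2 * s ∧ 2 ≤ 2 * s), c1, c2,
          F_base s s (by omega), F_base (s + 1) (2 * s) (by omega)]
        rw [if_pos (le_refl s), if_pos (by omega : s + 1 ≤ 2 * s),
          if_neg (by omega : ¬ 2 * s = s), if_pos rfl]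
        omega
      · rw [F_base s x (by omega), F_base (s + 1) x (by omega)]
        split_ifs <;> omega
    · have e1 : cntP s x s = cntP s ((x + 1) / 2) s + cntP s (x / 2) s := by
        rw [cntP, if_pos (by omega : 2 * s < x ∧ 2 ≤ x)]
      have e2 : cntP s x (2 * s) = cntP s ((x + 1) / 2) (2 * s) + cntP s (x / 2) (2 * s) := by
        rw [cntP, if_pos (by omega : 2 * s < x ∧ 2 ≤ x)]
      have eF : F s x = F s ((x + 1) / 2) + F s (x / 2) := by
        rw [F, if_pos (by omega : 2 * s ≤ x ∧ 2 ≤ x)]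
      by_cases hx4 : x = 2 * s + 1
      · have c1 : (x + 1) / 2 = s + 1 := by omega
        have c2 : x / 2 = s := by omega
        rw [eF, e1, e2, c1, c2, F_base (s + 1) x (by omega),
          cntP_base s (s + 1) s (by omega), cntP_base s s s (by omega),
          cntP_base s (s + 1) (2 * s) (by omega), cntP_base s s (2 * s) (by omega),
          F_base s s (by omega)]
        by_cases hs1 : s = 1
        · subst hs1
          have h32 : ((1 : Int) + 1 + 1) / 2 = 1 := by norm_num
          have h22 : ((1 : Int) + 1) / 2 = 1 := by norm_num
          have hF11 : F 1 1 = 1 := by rw [F_base 1 1 (by omega), if_pos (by omega)]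
          rw [F, if_pos (⟨by norm_num, by norm_num⟩ : 2 * 1 ≤ (1 : Int) + 1 ∧ 2 ≤ (1 : Int) + 1),
            h32, h22, hF11]
          split_ifs <;> omega
        · rw [F_base s (s + 1) (by omega), if_pos (by omega : s ≤ s + 1)]
          split_ifs <;> omega
      · have i1 := ih ((x + 1) / 2) (by omega) (by omega)
        have i2 := ih (x / 2) (by omega) (by omega)
        have eF' : F (s + 1) x = F (s + 1) ((x + 1) / 2) + F (s + 1) (x / 2) := by
          rw [F, if_pos (by omega : 2 * (s + 1) ≤ x ∧ 2 ≤ x)]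
        rw [eF, e1, e2, eF', i1, i2]
        ring

theorem F_step (s x : Int) (hs : 1 ≤ s) (hx : 0 ≤ x) :
    F s x = F (s + 1) x + cntP s x s + cntP s x (2 * s) :=
  F_step_aux s hs x.toNat x le_rfl hx

-- R2: folding 2s → s+s and 2s-1 → s+(s-1) turns the level-s piece counts into level-(s-1)
theorem cntP_step_aux (s w : Int) (hs : 2 ≤ s) (hw : w ≤ 2 * s - 2) :
    ∀ (n : Nat) (x : Int), x.toNat ≤ n → 0 ≤ x →
      cntP (s - 1) x w = cntP s x w
        + (if w = s then 2 * cntP s x (2 * s) + cntP s x (2 * s - 1) else 0)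
        + (if w = s - 1 then cntP s x (2 * s - 1) else 0) := by
  intro n
  induction n with
  | zero =>
    intro x hn hx
    have hx0 : x = 0 := by omega
    subst hx0
    rw [cntP_base (s - 1) 0 w (by omega), cntP_base s 0 w (by omega),
      cntP_base s 0 (2 * s) (by omega), cntP_base s 0 (2 * s - 1) (by omega)]
    split_ifs <;> omega
  | succ n ih =>
    intro x hn hx
    by_cases hxa : x ≤ 2 * s - 2
    · rw [cntP_base (s - 1) x w (by omega), cntP_base s x w (by omega),
        cntP_base s x (2 * s) (by omega), cntP_base s x (2 * s - 1) (by omega)]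
      split_ifs <;> omega
    · by_cases hxb : x = 2 * s - 1
      · subst hxb
        have c1 : (2 * s - 1 + 1) / 2 = s := by omega
        have c2 : (2 * s - 1) / 2 = s - 1 := by omega
        rw [cntP, if_pos (by omega : 2 * (s - 1) < 2 * s - 1 ∧ 2 ≤ 2 * s - 1), c1, c2,
          cntP_base (s - 1) s w (by omega), cntP_base (s - 1) (s - 1) w (by omega),
          cntP_base s (2 * s - 1) w (by omega),
          cntP_base s (2 * s - 1) (2 * s) (by omega),
          cntP_base s (2 * s - 1) (2 * s - 1) (by omega)]
        split_ifs <;> omega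
      · by_cases hxc : x = 2 * s
        · subst hxc
          have c1 : (2 * s + 1) / 2 = s := by omega
          have c2 : 2 * s / 2 = s := by omega
          rw [cntP, if_pos (by omega : 2 * (s - 1) < 2 * s ∧ 2 ≤ 2 * s), c1, c2,
            cntP_base (s - 1) s w (by omega),
            cntP_base s (2 * s) w (by omega),
            cntP_base s (2 * s) (2 * s) (by omega),
            cntP_base s (2 * s) (2 * s - 1) (by omega)]
          split_ifs <;> omega
        · have hxd : 2 * s + 1 ≤ x := by omega
          have eL : cntP (s - 1) x w = cntP (s - 1) ((x + 1) / 2) w + cntP (s - 1) (x / 2) w := by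
            rw [cntP, if_pos (by omega : 2 * (s - 1) < x ∧ 2 ≤ x)]
          have e0 : cntP s x w = cntP s ((x + 1) / 2) w + cntP s (x / 2) w := by
            rw [cntP, if_pos (by omega : 2 * s < x ∧ 2 ≤ x)]
          have e1 : cntP s x (2 * s) = cntP s ((x + 1) / 2) (2 * s) + cntP s (x / 2) (2 * s) := by
            rw [cntP, if_pos (by omega : 2 * s < x ∧ 2 ≤ x)]
          have e2 : cntP s x (2 * s - 1) = cntP s ((x + 1) / 2) (2 * s - 1) + cntP s (x / 2) (2 * s - 1) := by
            rw [cntP, if_pos (by omega : 2 * s < x ∧ 2 ≤ x)]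
          have i1 := ih ((x + 1) / 2) (by omega) (by omega)
          have i2 := ih (x / 2) (by omega) (by omega)
          rw [eL, e0, e1, e2, i1, i2]
          split_ifs <;> ring

theorem cntP_step (s x w : Int) (hs : 2 ≤ s) (hx : 0 ≤ x) (hw : w ≤ 2 * s - 2) :
    cntP (s - 1) x w = cntP s x w
      + (if w = s then 2 * cntP s x (2 * s) + cntP s x (2 * s - 1) else 0)
      + (if w = s - 1 then cntP s x (2 * s - 1) else 0) :=
  cntP_step_aux s w hs hw x.toNat x le_rfl hx

theorem map_sum_add3 (a : List Int) (f g h : Int → Int) :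
    (a.map fun x => f x + g x + h x).sum = (a.map f).sum + (a.map g).sum + (a.map h).sum := by
  induction a with
  | nil => simp
  | cons x t ih => simp only [List.map_cons, List.sum_cons, ih]; ring

theorem Msum_step (s : Int) (a : List Int) (hs : 1 ≤ s) (ha : ∀ x ∈ a, 0 ≤ x) :
    Msum s a = Msum (s + 1) a + Csum s a s + Csum s a (2 * s) := by
  unfold Msum Csum
  have hc : a.map (F s) = a.map (fun x => F (s + 1) x + cntP s x s + cntP s x (2 * s)) :=
    List.map_congr_left (fun x hx => F_step s x hs (ha x hx))
  rw [hc, map_sum_add3]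

theorem map_sum_two (a : List Int) (f g : Int → Int) :
    (a.map fun x => 2 * f x + g x).sum = 2 * (a.map f).sum + (a.map g).sum := by
  induction a with
  | nil => simp
  | cons x t ih => simp only [List.map_cons, List.sum_cons, ih]; ring

theorem Csum_step (s : Int) (a : List Int) (w : Int) (hs : 2 ≤ s) (ha : ∀ x ∈ a, 0 ≤ x)
    (hw : w ≤ 2 * s - 2) :
    Csum (s - 1) a w = Csum s a w
      + (if w = s then 2 * Csum s a (2 * s) + Csum s a (2 * s - 1) else 0)
      + (if w = s - 1 then Csum s a (2 * s - 1) else 0) := by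
  unfold Csum
  have hc : a.map (fun x => cntP (s - 1) x w)
      = a.map (fun x => cntP s x w
          + (if w = s then 2 * cntP s x (2 * s) + cntP s x (2 * s - 1) else 0)
          + (if w = s - 1 then cntP s x (2 * s - 1) else 0)) :=
    List.map_congr_left (fun x hx => cntP_step s x w hs (ha x hx) hw)
  rw [hc, map_sum_add3]
  by_cases h1 : w = s
  · subst h1
    have hne : ¬ (w = w - 1) := by omega
    simp only [if_true, if_neg hne]
    rw [map_sum_two a (fun x => cntP w x (2 * w)) (fun x => cntP w x (2 * w - 1))]
    simp
  · simp only [if_neg h1]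
    by_cases h2 : w = s - 1
    · simp only [if_pos h2]
      simp
    · simp only [if_neg h2]
      simp

theorem Csum_nonneg (s : Int) (a : List Int) (w : Int) : 0 ≤ Csum s a w := by
  apply List.sum_nonneg
  intro y hy
  obtain ⟨x, _, rfl⟩ := List.mem_map.mp hy
  exact cntP_nonneg s x w

theorem Csum_zero_of_lt (s : Int) (a : List Int) (w : Int) (h : ∀ x ∈ a, x < w) :
    Csum s a w = 0 := by
  unfold Csum
  have hc : a.map (fun x => cntP s x w) = a.map (fun _ => (0 : Int)) :=
    List.map_congr_left (fun x hx => cntP_zero_of_lt s x w (h x hx))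
  rw [hc]
  simp

theorem Msum_anti (b b' : Int) (a : List Int) (hb : 1 ≤ b) (hbb : b ≤ b') :
    Msum b' a ≤ Msum b a := by
  unfold Msum
  apply List.sum_le_sum
  intro x _
  exact F_anti b b' x hb hbb

theorem Msum_one (a : List Int) (ha : ∀ x ∈ a, 0 ≤ x) : Msum 1 a = a.sum := by
  unfold Msum
  have hc : a.map (F 1) = a.map (fun x => x) :=
    List.map_congr_left (fun x hx => F_one x (ha x hx))
  rw [hc, List.map_id']

theorem Msum_zero_of_big (b : Int) (a : List Int) (hb : 1 ≤ b) (h : ∀ x ∈ a, x < b) :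
    Msum b a = 0 := by
  unfold Msum
  have hc : a.map (F b) = a.map (fun _ => (0 : Int)) :=
    List.map_congr_left (fun x hx => F_zero_of_lt b x hb (h x hx))
  rw [hc]
  simp

theorem GoodR_unique (k : Int) (a : List Int) (r r' : Int)
    (h1 : GoodR k a r) (h2 : GoodR k a r') : r = r' := by
  obtain ⟨hr1, hr2, hr3⟩ := h1
  obtain ⟨hs1, hs2, hs3⟩ := h2
  by_contra hne
  rcases lt_trichotomy r r' with h | h | h
  · have := Msum_anti (r + 1) r' a (by omega) (by omega)
    omega
  · exact hne h
  · have := Msum_anti (r' + 1) r a (by omega) (by omega)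
    omega

theorem buildCa_go (a : List Int) (f : Int → Int) (w : Int) :
    (a.foldl (fun ca x => let v := ca x + 1; fun w => if w = x then v else ca w) f) w
      = f w + (a.count w : Int) := by
  induction a generalizing f with
  | nil => simp
  | cons x t ih =>
    simp only [List.foldl_cons, ih, List.count_cons]
    by_cases h : w = x <;> simp [h, beq_iff_eq] <;> omega

theorem buildCa_apply (a : List Int) (w : Int) : buildCa a w = (a.count w : Int) := by
  simpa using buildCa_go a (fun _ => 0) w

theorem count_map_sum (a : List Int) (w : Int) :
    (a.map (fun x => if x = w then (1 : Int) else 0)).sum = (a.count w : Int) := by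
  induction a with
  | nil => simp
  | cons x t ih =>
    simp only [List.map_cons, List.sum_cons, ih, List.count_cons]
    by_cases h : x = w <;> simp [h, beq_iff_eq] <;> omega

theorem Csum_init (s : Int) (a : List Int) (w : Int) (h : ∀ x ∈ a, x ≤ 2 * s) :
    Csum s a w = (a.count w : Int) := by
  unfold Csum
  have hc : a.map (fun x => cntP s x w) = a.map (fun x => if x = w then (1 : Int) else 0) :=
    List.map_congr_left (fun x hx => cntP_base s x w (h x hx))
  rw [hc, count_map_sum]

-- the A-side loop lemma
theorem loopA_good (k : Int) (a : List Int) (ha : ∀ x ∈ a, 0 ≤ x ∧ x ≤ 10000000)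
    (hk1 : k ≤ Msum 1 a) :
    ∀ (s : Nat) (ca : Int → Int) (m : Int), 1 ≤ s →
      (∀ w : Int, 0 ≤ w → w ≤ 2 * (s : Int) → ca w = Csum (s : Int) a w) →
      m = Msum ((s : Int) + 1) a → m < k →
      GoodR k a (loopA k (s + 1) ca m) := by
  intro s
  induction s with
  | zero => intro ca m h1 _ _ _; omega
  | succ s ih =>
    intro ca m _ hinv hm hmk
    have ha0 : ∀ x ∈ a, 0 ≤ x := fun x hx => (ha x hx).1
    set S : Int := ((s : Nat) : Int) + 1 with hSdef
    have hS0 : (0 : Int) ≤ ((s : Nat) : Int) := Int.natCast_nonneg s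
    have hS1 : 1 ≤ S := by omega
    have hcast : ((s + 1 : Nat) : Int) = S := by rw [hSdef]; push_cast; ring
    have hinvS : ∀ w : Int, 0 ≤ w → w ≤ 2 * S → ca w = Csum S a w := by
      intro w h0 hw
      have h := hinv w h0 (by rw [hcast]; exact hw)
      rwa [hcast] at h
    have hmS : m = Msum (S + 1) a := by rw [← hcast]; exact hm
    have hE0 : 0 ≤ Csum S a (2 * S) := Csum_nonneg _ _ _
    have hO0 : 0 ≤ Csum S a (2 * S - 1) := Csum_nonneg _ _ _
    have hMstep : Msum S a = Msum (S + 1) a + Csum S a S + Csum S a (2 * S) :=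
      Msum_step S a hS1 ha0
    have hbigE : 5000000 < S → Csum S a (2 * S) = 0 := fun h =>
      Csum_zero_of_lt _ _ _ (fun x hx => by have := (ha x hx).2; omega)
    have hbigO : 5000000 < S → Csum S a (2 * S - 1) = 0 := fun h =>
      Csum_zero_of_lt _ _ _ (fun x hx => by have := (ha x hx).2; omega)
    have hreadS : ca S = Csum S a S := hinvS S (by omega) (by omega)
    have hread2S : ca (2 * S) = Csum S a (2 * S) := hinvS (2 * S) (by omega) (by omega)
    have hread2S1 : ca (2 * S - 1) = Csum S a (2 * S - 1) := hinvS (2 * S - 1) (by omega) (by omega)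
    -- recursion helper: any updated array agreeing with the level-(S-1) counts lets us recurse
    have key : ∀ ca3 : Int → Int,
        (2 ≤ S → ∀ w : Int, 0 ≤ w → w ≤ 2 * S - 2 → ca3 w = Csum (S - 1) a w) →
        ¬ Msum S a ≥ k →
        GoodR k a (loopA k (s + 1) ca3 (Msum S a)) := by
      intro ca3 hc3 hfin
      have hs1 : 1 ≤ s := by
        rcases Nat.eq_zero_or_pos s with h0 | h
        · exfalso
          have hs1' : S = 1 := by rw [hSdef, h0]; simp
          rw [hs1'] at hfin
          exact hfin hk1
        · exact h
      have hS2 : 2 ≤ S := by omega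
      have hcs : ((s : Nat) : Int) = S - 1 := by omega
      apply ih ca3 (Msum S a) hs1
      · intro w h0 hw
        rw [hcs]
        exact hc3 hS2 w h0 (by rw [hcs] at hw; omega)
      · rfl
      · omega
    rw [loopA]
    dsimp only
    rw [hcast]
    by_cases h5 : S ≤ 5000000
    · rw [if_pos h5]
      by_cases hE : 0 < ca (2 * S)
      · rw [if_pos hE]
        rw [show m + ca S + ca (2 * S) = Msum S a from by rw [hreadS, hread2S]; omega]
        by_cases hfin : Msum S a ≥ k
        · rw [if_pos hfin]
          exact ⟨hS1, hfin, by omega⟩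
        · rw [if_neg hfin]
          refine key _ (fun hS2' w h0 hw => ?_) hfin
          have hreadW : ca w = Csum S a w := hinvS w h0 (by omega)
          have hreadS1' : ca (S - 1) = Csum S a (S - 1) := hinvS _ (by omega) (by omega)
          rw [Csum_step S a w hS2' ha0 (by omega)]
          try simp only [ite_apply]
          try dsimp only [Prod.fst, Prod.snd]
          try simp only [ite_apply]
          try beta_reduce
          by_cases hw1 : w = S - 1
          · subst hw1; split_ifs <;> omega
          · by_cases hw2 : w = S
            · subst hw2; split_ifs <;> omega
            · split_ifs <;> omega
      · rw [if_neg hE]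
        have hEz : Csum S a (2 * S) = 0 := by omega
        rw [show m + ca S = Msum S a from by rw [hreadS]; omega]
        by_cases hfin : Msum S a ≥ k
        · rw [if_pos hfin]
          exact ⟨hS1, hfin, by omega⟩
        · rw [if_neg hfin]
          refine key _ (fun hS2' w h0 hw => ?_) hfin
          have hreadW : ca w = Csum S a w := hinvS w h0 (by omega)
          have hreadS1' : ca (S - 1) = Csum S a (S - 1) := hinvS _ (by omega) (by omega)
          rw [Csum_step S a w hS2' ha0 (by omega)]
          try simp only [ite_apply]
          try dsimp only [Prod.fst, Prod.snd]
          try simp only [ite_apply]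
          try beta_reduce
          by_cases hw1 : w = S - 1
          · subst hw1; split_ifs <;> omega
          · by_cases hw2 : w = S
            · subst hw2; split_ifs <;> omega
            · split_ifs <;> omega
    · rw [if_neg h5]
      have hEz : Csum S a (2 * S) = 0 := hbigE (by omega)
      have hOz : Csum S a (2 * S - 1) = 0 := hbigO (by omega)
      rw [show m + ca S = Msum S a from by rw [hreadS]; omega]
      by_cases hfin : Msum S a ≥ k
      · rw [if_pos hfin]
        exact ⟨hS1, hfin, by omega⟩
      · rw [if_neg hfin]
        refine key _ (fun hS2' w h0 hw => ?_) hfin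
        have hreadW : ca w = Csum S a w := hinvS w h0 (by omega)
        have hreadS1' : ca (S - 1) = Csum S a (S - 1) := hinvS _ (by omega) (by omega)
        rw [Csum_step S a w hS2' ha0 (by omega)]
        try simp only [ite_apply]
        try dsimp only [Prod.fst, Prod.snd]
        try simp only [ite_apply]
        try beta_reduce
        by_cases hw1 : w = S - 1
        · subst hw1; split_ifs <;> omega
        · by_cases hw2 : w = S
          · subst hw2; split_ifs <;> omega
          · split_ifs <;> omega

-- the B-side lemmas
theorem fB_correct (b : Int) (hb : 1 ≤ b) :
    ∀ (fuel : Nat) (x : Int) (memo : PySem.Dict Int Int), x.toNat < fuel → MemoInv b memo →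
      (fB b fuel x memo).1 = F b x ∧ MemoInv b (fB b fuel x memo).2 := by
  intro fuel
  induction fuel with
  | zero => intro x memo h; omega
  | succ fuel ih =>
    intro x memo hfu hinv
    simp only [fB]
    by_cases h1 : x < b
    · rw [if_pos h1]
      exact ⟨(F_zero_of_lt b x hb h1).symm, hinv⟩
    · rw [if_neg h1]
      by_cases h2 : x < 2 * b
      · rw [if_pos h2]
        refine ⟨?_, hinv⟩
        rw [F_base b x (by omega), if_pos (by omega)]
      · rw [if_neg h2]
        have hx2 : 2 ≤ x := by omega
        have hrec : F b x = F b ((x + 1) / 2) + F b (x / 2) := by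
          rw [F, if_pos ⟨by omega, hx2⟩]
        cases hmx : memo.get? x with
        | some r =>
          exact ⟨hinv x r hmx, hinv⟩
        | none =>
          dsimp only
          have hfd1 : PySem.Int.floordiv (x + 1) 2 = (x + 1) / 2 :=
            PySem.Int.floordiv_eq_ediv_of_pos (by norm_num)
          have hfd2 : PySem.Int.floordiv x 2 = x / 2 :=
            PySem.Int.floordiv_eq_ediv_of_pos (by norm_num)
          rw [hfd1, hfd2]
          have i1 := ih ((x + 1) / 2) memo (by omega) hinv
          have i2 := ih (x / 2) (fB b fuel ((x + 1) / 2) memo).2 (by omega) i1.2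
          constructor
          · rw [i1.1, i2.1, hrec]
          · intro y r hy
            rw [PySem.Dict.get?_insert] at hy
            by_cases hyx : y = x
            · rw [if_pos hyx] at hy
              have : r = (fB b fuel ((x + 1) / 2) memo).1 + (fB b fuel (x / 2) (fB b fuel ((x + 1) / 2) memo).2).1 := by
                injection hy with h
                exact h.symm
              rw [this, i1.1, i2.1, hyx, hrec]
            · rw [if_neg hyx] at hy
              exact i2.2 y r hy

theorem piecesB_fold (b : Int) (hb : 1 ≤ b) :
    ∀ (l : List Int) (acc : Int) (memo : PySem.Dict Int Int), MemoInv b memo →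
      ((l.foldl (fun st x => let p := fB b (x.toNat + 1) x st.2; (st.1 + p.1, p.2))
        (acc, memo)).1) = acc + (l.map (F b)).sum := by
  intro l
  induction l with
  | nil => intro acc memo _; simp
  | cons x t ih =>
    intro acc memo hinv
    simp only [List.foldl_cons, List.map_cons, List.sum_cons]
    have h := fB_correct b hb (x.toNat + 1) x memo (by omega) hinv
    rw [ih (acc + (fB b (x.toNat + 1) x memo).1) (fB b (x.toNat + 1) x memo).2 h.2, h.1]
    ring

theorem piecesB_eq (b : Int) (a : List Int) (hb : 1 ≤ b) : piecesB b a = Msum b a := by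
  unfold piecesB Msum
  rw [piecesB_fold b hb a 0 PySem.Dict.empty (fun y r hy => by
    rw [PySem.Dict.get?_empty] at hy; cases hy)]
  ring

theorem bsB_good (k : Int) (a : List Int) :
    ∀ (d : Nat) (lo hi : Int), (hi - lo).toNat ≤ d → 1 ≤ lo → lo ≤ hi →
      k ≤ Msum lo a → Msum (hi + 1) a < k → GoodR k a (bsB k a lo hi) := by
  intro d
  induction d with
  | zero =>
    intro lo hi hd h1 h2 h3 h4
    have he : lo = hi := by omega
    rw [bsB, if_neg (by omega)]
    exact ⟨h1, h3, by rw [he]; exact h4⟩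
  | succ d ih =>
    intro lo hi hd h1 h2 h3 h4
    rw [bsB]
    by_cases hlt : lo < hi
    · rw [if_pos hlt]
      have hmid := PySem.Int.floordiv_two_mid_bounds (lo := lo + 1) (hi := hi) (by omega)
      have hplus : lo + 1 + hi = lo + hi + 1 := by ring
      rw [hplus] at hmid
      set mid := PySem.Int.floordiv (lo + hi + 1) 2 with hmiddef
      have hp : piecesB mid a = Msum mid a := piecesB_eq mid a (by omega)
      by_cases hge : piecesB mid a ≥ k
      · rw [if_pos hge]
        exact ih mid hi (by omega) (by omega) (by omega) (by omega) h4
      · rw [if_neg hge]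
        refine ih lo (mid - 1) (by omega) (by omega) (by omega) h3 ?_
        have : mid - 1 + 1 = mid := by ring
        rw [this]
        omega
    · rw [if_neg hlt]
      have he : lo = hi := by omega
      exact ⟨h1, h3, by rw [he]; exact h4⟩

-- ===== VERDICT (by name: the statement is the Claim_ definition above) =====
theorem solve_spec : Claim_equal_solve := by
  unfold Claim_equal_solve
  intro n k a _ hpre
  unfold Spec_solve solve solve_alt
  by_cases hs : a.sum < k
  · rw [if_pos hs, if_pos hs]
  · rcases hpre with hs' | ⟨hk, ha⟩
    · exact absurd hs' hs
    rw [if_neg hs, if_neg hs]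
    have ha0 : ∀ x ∈ a, 0 ≤ x := fun x hx => (ha x hx).1
    have hk1 : k ≤ Msum 1 a := by rw [Msum_one a ha0]; omega
    -- A's loop result satisfies GoodR
    have hAgood : GoodR k a (loopA k 10000001 (buildCa a) 0) := by
      have hcast : ((10000000 : Nat) : Int) = (10000000 : Int) := by norm_cast
      have h := loopA_good k a ha hk1 10000000 (buildCa a) 0 (by norm_num)
        (fun w h0 hw => by
          rw [buildCa_apply, hcast]
          exact (Csum_init 10000000 a w (fun x hx => by have := (ha x hx).2; omega)).symm)
        (by
          rw [hcast]
          exact (Msum_zero_of_big 10000001 a (by norm_num)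
            (fun x hx => by have := (ha x hx).2; omega)).symm)
        (by omega)
      have hfe : (10000000 : Nat) + 1 = 10000001 := by norm_num
      rwa [hfe] at h
    -- B's binary search result satisfies GoodR
    have hane : a ≠ [] := by
      intro h
      rw [h] at hs
      simp at hs
      omega
    cases hmx : PySem.List.max? a (fun y => y) with
    | none => exact absurd ((PySem.List.max?_eq_none_iff _ _).mp hmx) hane
    | some mx =>
      have hmax : ∀ y ∈ a, y ≤ mx := fun y hy => PySem.List.max?_isMax hmx y hy
      have hmx1 : 1 ≤ mx := by
        by_contra hc
        have hz : ∀ x ∈ a, x = 0 := fun x hx => by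
          have h1 := ha0 x hx
          have h2 := hmax x hx
          omega
        have := List.sum_eq_zero hz
        omega
      have hBgood : GoodR k a (bsB k a 1 mx) := by
        refine bsB_good k a (mx - 1).toNat 1 mx (by omega) le_rfl hmx1 hk1 ?_
        have hzz : Msum (mx + 1) a = 0 :=
          Msum_zero_of_big (mx + 1) a (by omega) (fun x hx => by have := hmax x hx; omega)
        omega
      exact GoodR_unique k a _ _ hAgood hBgood
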